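-- pv_equiv track=rewrite | github.com/HEPHZIBAI/21-days-of-Coding-Challenge | 8 day Terms Of AP.py | termsOfAP
-- ===== SOURCE A (Python) =====
-- def termsOfAP(x):
--     series = []
--     N = 1
--     while len(series) < x:
--         term = 3 * N + 2
--         if term % 4 != 0:
--             series.append(term)
--         N += 1
--     return series
--     pass
-- ===== SOURCE B (Python) =====
-- def termsOfAP(x):
--     series = []
--     for i in range(x):
--         g, r = divmod(i, 3)
--         N = 4 * g + (1 if r == 0 else 3 if r == 1 else 4)
--         series.append(3 * N + 2)
--     return series
-- ===== Notes on version B (the rewrite author's own statement) =====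
-- stated objective: alternative
-- what changed: B derives each valid N arithmetically from the output index (closed-form block enumeration of the non-excluded congruence classes), replacing A's while loop that tries every N and filters with a divisibility test.
import Mathlib
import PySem

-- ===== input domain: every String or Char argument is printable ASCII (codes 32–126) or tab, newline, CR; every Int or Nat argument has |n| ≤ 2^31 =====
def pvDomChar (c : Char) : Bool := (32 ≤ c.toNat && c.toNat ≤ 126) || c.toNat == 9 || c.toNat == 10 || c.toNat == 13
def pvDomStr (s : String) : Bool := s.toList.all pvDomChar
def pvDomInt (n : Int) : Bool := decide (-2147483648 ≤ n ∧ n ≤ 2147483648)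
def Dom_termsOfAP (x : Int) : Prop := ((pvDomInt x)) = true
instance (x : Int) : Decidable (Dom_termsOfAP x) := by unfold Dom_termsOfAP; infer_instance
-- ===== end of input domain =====

-- B replaces A's trial loop over N with a skip test by direct enumeration of the
-- kept terms (three valid N per block of four), removing the divisibility check.

-- ===== PORT A =====
-- A's while loop; terminates because the skipped N (N ≡ 2 mod 4) is never followed
-- by another skipped N, so every two iterations the series grows.
def termsOfAP_loop (x : Int) (series : List Int) (N : Int) : List Int :=
  if (series.length : Int) < x then
    if PySem.Int.mod (3 * N + 2) 4 ≠ 0 then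
      termsOfAP_loop x (series ++ [3 * N + 2]) (N + 1)
    else
      termsOfAP_loop x series (N + 1)
  else series
termination_by 2 * (x - series.length).toNat + (if PySem.Int.mod (3 * N + 2) 4 = 0 then 1 else 0)
decreasing_by
  all_goals
    have h4 : PySem.Int.mod (3 * N + 2) 4 = (3 * N + 2) % 4 :=
      PySem.Int.mod_eq_emod_of_pos (by norm_num)
    have h5 : PySem.Int.mod (3 * (N + 1) + 2) 4 = (3 * (N + 1) + 2) % 4 :=
      PySem.Int.mod_eq_emod_of_pos (by norm_num)
    simp only [h4, h5, List.length_append, List.length_cons, List.length_nil] at *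
    split_ifs at * <;> omega

def termsOfAP (x : Int) : List Int :=
  termsOfAP_loop x [] 1

-- ===== PORT B =====
def termsOfAP_alt (x : Int) : List Int :=
  (PySem.List.pyRange 0 x 1).foldl (fun series i =>
    let g := PySem.Int.floordiv i 3
    let r := PySem.Int.mod i 3
    let N := 4 * g + (if r = 0 then 1 else if r = 1 then 3 else 4)
    series ++ [3 * N + 2]) []

-- ===== PRECONDITION & SPEC =====
def Spec_termsOfAP (x : Int) (out : List Int) : Prop := out = termsOfAP_alt x
instance (x : Int) (out : List Int) : Decidable (Spec_termsOfAP x out) := by unfold Spec_termsOfAP; infer_instance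

-- ===== CLAIM (what is proved, stated in full; the proofs are below) =====
def Claim_equal_termsOfAP : Prop := ∀ (x : Int), Dom_termsOfAP x → Spec_termsOfAP x (termsOfAP x)

-- ===== LEMMAS AND PROOFS =====

-- the N visited by A at the p-th append (0-based): blocks of three kept N per four
def pvNf (p : Nat) : Int :=
  4 * (p / 3 : Nat) + (if p % 3 = 0 then 1 else if p % 3 = 1 then 3 else 4)

lemma pvNf_succ (p : Nat) :
    pvNf (p + 1) = if p % 3 = 0 then pvNf p + 2 else pvNf p + 1 := by
  unfold pvNf
  split_ifs <;> omega

lemma pvNf_kept (p : Nat) : PySem.Int.mod (3 * pvNf p + 2) 4 ≠ 0 := by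
  rw [PySem.Int.mod_eq_emod_of_pos (by norm_num)]
  unfold pvNf
  split_ifs <;> omega

lemma pvNf_skip (p : Nat) (h : p % 3 = 0) :
    PySem.Int.mod (3 * (pvNf p + 1) + 2) 4 = 0 := by
  rw [PySem.Int.mod_eq_emod_of_pos (by norm_num)]
  unfold pvNf
  split_ifs <;> omega

lemma termsOfAP_loop_eq (x : Int) :
    ∀ (m : Nat) (series : List Int) (p : Nat),
      (x - series.length).toNat = m →
      termsOfAP_loop x series (pvNf p) =
        series ++ (List.range m).map (fun j => 3 * pvNf (p + j) + 2) := by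
  intro m
  induction m with
  | zero =>
    intro series p h
    rw [termsOfAP_loop, if_neg (show ¬ ((series.length : Int) < x) by omega)]
    simp
  | succ m ih =>
    intro series p h
    have hlen : (series.length : Int) < x := by omega
    have hgen : (List.range (m + 1)).map (fun j => 3 * pvNf (p + j) + 2) =
        (3 * pvNf p + 2) :: (List.range m).map (fun j => 3 * pvNf (p + 1 + j) + 2) := by
      rw [List.range_succ_eq_map, List.map_cons, List.map_map]
      congr 1
      apply List.map_congr_left
      intro a _
      show 3 * pvNf (p + (a + 1)) + 2 = 3 * pvNf (p + 1 + a) + 2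
      have hpa : p + (a + 1) = p + 1 + a := by omega
      rw [hpa]
    rw [termsOfAP_loop, if_pos hlen, if_pos (pvNf_kept p)]
    by_cases hp : p % 3 = 0
    · -- next N is the skipped one; one more iteration (or exit if m = 0)
      have hskip := pvNf_skip p hp
      rcases Nat.eq_zero_or_pos m with hm | hm
      · subst hm
        rw [termsOfAP_loop]
        rw [if_neg (by simp only [List.length_append, List.length_cons, List.length_nil]; omega)]
        rw [hgen]
        simp
      · rw [termsOfAP_loop]
        rw [if_pos (by simp only [List.length_append, List.length_cons, List.length_nil]; omega)]
        rw [if_neg (by simpa using hskip)]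
        have hnext : pvNf p + 1 + 1 = pvNf (p + 1) := by rw [pvNf_succ, if_pos hp]; ring
        rw [hnext, ih (series ++ [3 * pvNf p + 2]) (p + 1)
            (by simp only [List.length_append, List.length_cons, List.length_nil]; omega)]
        rw [hgen]
        simp
    · have hnext : pvNf p + 1 = pvNf (p + 1) := by rw [pvNf_succ, if_neg hp]
      rw [hnext, ih (series ++ [3 * pvNf p + 2]) (p + 1)
          (by simp only [List.length_append, List.length_cons, List.length_nil]; omega)]
      rw [hgen]
      simp

lemma foldl_append_map {α β : Type} (f : α → β) :
    ∀ (l : List α) (init : List β),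
      l.foldl (fun acc i => acc ++ [f i]) init = init ++ l.map f := by
  intro l
  induction l with
  | nil => simp
  | cons a l ih => intro init; simp [ih]

lemma termsOfAP_alt_eq (x : Int) :
    termsOfAP_alt x = (List.range x.toNat).map (fun j => 3 * pvNf j + 2) := by
  unfold termsOfAP_alt
  rw [PySem.List.pyRange_one]
  have hx : (x - 0).toNat = x.toNat := by omega
  rw [hx, List.foldl_map, foldl_append_map]
  simp only [List.nil_append]
  apply List.map_congr_left
  intro k _
  have hg : PySem.Int.floordiv (0 + (k : Int)) 3 = ((k / 3 : Nat) : Int) := by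
    rw [zero_add]; exact_mod_cast PySem.Int.floordiv_natCast k 3
  have hr : PySem.Int.mod (0 + (k : Int)) 3 = ((k % 3 : Nat) : Int) := by
    rw [zero_add]; exact_mod_cast PySem.Int.mod_natCast k 3
  have h3 : k % 3 = 0 ∨ k % 3 = 1 ∨ k % 3 = 2 := by omega
  rcases h3 with h | h | h <;> simp only [hg, hr, h, pvNf] <;> norm_num

-- ===== VERDICT (by name: the statement is the Claim_ definition above) =====
theorem termsOfAP_spec : Claim_equal_termsOfAP := by
  intro x _
  unfold Spec_termsOfAP termsOfAP
  have h0 : pvNf 0 = 1 := by decide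
  rw [← h0, termsOfAP_loop_eq x x.toNat [] 0 (by simp), termsOfAP_alt_eq]
  simp
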